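-- pv_equiv track=rewrite | github.com/riyanhax/Control_Venta_Jugos | taller_fundamentos/ejecicio_2_clase.py | cifras
-- ===== SOURCE A (Python) =====
-- def cifras(x):
--     i = 0
--     while x > 0:
--         x = x // 10
--         i += 1
--     if i % 2 == 0:
--         val = 0
--     else:
--         val = 1
--     return val
-- ===== SOURCE B (Python) =====
-- def cifras(x):
--     if x <= 0:
--         return 0
--     while x >= 100:
--         x //= 100
--     return 1 if x < 10 else 0
-- ===== Notes on version B (the rewrite author's own statement) =====
-- stated objective: alternative
-- what changed: Instead of counting digits one at a time and taking the count's parity, B strips two digits per step and reads the parity directly off the one- or two-digit remainder.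
import Mathlib
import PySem

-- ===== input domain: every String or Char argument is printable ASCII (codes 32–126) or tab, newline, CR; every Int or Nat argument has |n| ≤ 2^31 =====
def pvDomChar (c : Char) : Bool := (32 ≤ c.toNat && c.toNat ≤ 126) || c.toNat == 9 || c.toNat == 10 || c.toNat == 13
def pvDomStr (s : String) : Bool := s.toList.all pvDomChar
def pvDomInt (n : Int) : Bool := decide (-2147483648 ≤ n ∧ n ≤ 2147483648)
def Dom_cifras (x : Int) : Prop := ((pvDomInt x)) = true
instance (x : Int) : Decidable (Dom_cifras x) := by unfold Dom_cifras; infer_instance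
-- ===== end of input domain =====

-- B strips two digits per step (x //= 100) and reads the parity off the one- or two-digit
-- remainder, instead of A's one-digit-at-a-time counter followed by mod 2 (alternative decomposition).

-- ===== PORT A =====
-- the 'while x > 0: x = x // 10; i += 1' loop of A, carrying the counter i
def cifrasLoop (x : Int) (i : Int) : Int :=
  if h : x > 0 then cifrasLoop (PySem.Int.floordiv x 10) (i + 1) else i
termination_by x.toNat
decreasing_by
  rw [PySem.Int.floordiv_eq_ediv_of_pos (by omega)]; omega

def cifras (x : Int) : Int :=
  let i := cifrasLoop x 0
  if PySem.Int.mod i 2 == 0 then 0 else 1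

-- ===== PORT B =====
-- the 'while x >= 100: x //= 100' loop of B
def altLoop (x : Int) : Int :=
  if _h : x ≥ 100 then altLoop (PySem.Int.floordiv x 100) else x
termination_by x.toNat
decreasing_by
  rw [PySem.Int.floordiv_eq_ediv_of_pos (by omega)]; omega

def cifras_alt (x : Int) : Int :=
  if x ≤ 0 then 0
  else if altLoop x < 10 then 1 else 0

-- ===== PRECONDITION & SPEC =====
def Spec_cifras (x : Int) (out : Int) : Prop := out = cifras_alt x
instance (x : Int) (out : Int) : Decidable (Spec_cifras x out) := by unfold Spec_cifras; infer_instance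

-- ===== CLAIM (what is proved, stated in full; the proofs are below) =====
def Claim_equal_cifras : Prop := ∀ (x : Int), Dom_cifras x → Spec_cifras x (cifras x)

-- ===== LEMMAS AND PROOFS =====


-- one unfolding of each loop (stated separately so we can rewrite a chosen occurrence)
theorem cifrasLoop_step (x i : Int) (h : x > 0) :
    cifrasLoop x i = cifrasLoop (PySem.Int.floordiv x 10) (i + 1) := by
  conv_lhs => rw [cifrasLoop]
  rw [dif_pos h]

theorem cifrasLoop_base (x i : Int) (h : ¬ x > 0) : cifrasLoop x i = i := by
  rw [cifrasLoop, dif_neg h]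

theorem altLoop_step (x : Int) (h : x ≥ 100) :
    altLoop x = altLoop (PySem.Int.floordiv x 100) := by
  conv_lhs => rw [altLoop]
  rw [dif_pos h]

theorem altLoop_base (x : Int) (h : ¬ x ≥ 100) : altLoop x = x := by
  rw [altLoop, dif_neg h]

-- the counter of A's loop is a pure offset
theorem cifrasLoop_shift (n : Nat) : ∀ x : Int, x.toNat = n →
    ∀ i : Int, cifrasLoop x i = cifrasLoop x 0 + i := by
  induction n using Nat.strong_induction_on with
  | _ n ih =>
    intro x hx i
    by_cases h : x > 0
    · have hd : PySem.Int.floordiv x 10 = x / 10 := PySem.Int.floordiv_eq_ediv_of_pos (by omega)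
      have hlt : (PySem.Int.floordiv x 10).toNat < n := by rw [hd]; omega
      rw [cifrasLoop_step x i h, cifrasLoop_step x 0 h,
          ih _ hlt _ rfl (i + 1), ih _ hlt _ rfl (0 + 1)]
      omega
    · rw [cifrasLoop_base x i h, cifrasLoop_base x 0 h]; omega

-- core parity correspondence between the two loops, for positive x
theorem main_parity (n : Nat) : ∀ x : Int, x.toNat = n → 0 < x →
    (if PySem.Int.mod (cifrasLoop x 0) 2 == 0 then (0:Int) else 1)
      = (if altLoop x < 10 then (1:Int) else 0) := by
  induction n using Nat.strong_induction_on with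
  | _ n ih =>
    intro x hx hpos
    have hd10 : PySem.Int.floordiv x 10 = x / 10 := PySem.Int.floordiv_eq_ediv_of_pos (by omega)
    by_cases hbig : x ≥ 100
    · -- x has ≥ 3 digits: both loops step down by two digits, parity preserved
      have hd100 : PySem.Int.floordiv x 100 = x / 100 := PySem.Int.floordiv_eq_ediv_of_pos (by omega)
      have hd10' : PySem.Int.floordiv (x / 10) 10 = x / 10 / 10 :=
        PySem.Int.floordiv_eq_ediv_of_pos (by omega)
      have hcomp : x / 10 / 10 = x / 100 := by omega
      have hA : cifrasLoop x 0 = cifrasLoop (x / 100) 0 + 2 := by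
        rw [cifrasLoop_step x 0 (by omega), hd10,
            cifrasLoop_step (x / 10) (0 + 1) (by omega), hd10', hcomp,
            cifrasLoop_shift _ _ rfl]
        omega
      have hB : altLoop x = altLoop (x / 100) := by
        rw [altLoop_step x hbig, hd100]
      have hlt : (x / 100).toNat < n := by omega
      have hih := ih _ hlt (x / 100) rfl (by omega)
      have hmod : PySem.Int.mod (cifrasLoop x 0) 2 = PySem.Int.mod (cifrasLoop (x / 100) 0) 2 := by
        rw [hA, PySem.Int.mod_eq_emod_of_pos (by omega), PySem.Int.mod_eq_emod_of_pos (by omega)]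
        omega
      rw [hmod, hB]; exact hih
    · by_cases hten : x ≥ 10
      · -- two digits: A counts 2, B leaves x ≥ 10
        have hA : cifrasLoop x 0 = 2 := by
          rw [cifrasLoop_step x 0 (by omega), hd10,
              cifrasLoop_step (x / 10) (0 + 1) (by omega),
              PySem.Int.floordiv_eq_ediv_of_pos (by omega)]
          have h0 : x / 10 / 10 = 0 := by omega
          rw [h0, cifrasLoop_base 0 _ (by omega)]
          norm_num
        have hB : altLoop x = x := altLoop_base x (by omega)
        rw [hA, hB]
        simp [PySem.Int.mod]
        omega
      · -- one digit: A counts 1, B leaves x < 10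
        have hA : cifrasLoop x 0 = 1 := by
          rw [cifrasLoop_step x 0 (by omega), hd10]
          have h0 : x / 10 = 0 := by omega
          rw [h0, cifrasLoop_base 0 _ (by omega)]
          norm_num
        have hB : altLoop x = x := altLoop_base x (by omega)
        rw [hA, hB]
        simp [PySem.Int.mod]
        omega

-- ===== VERDICT (by name: the statement is the Claim_ definition above) =====
theorem cifras_spec : Claim_equal_cifras := by
  intro x _
  unfold Spec_cifras cifras cifras_alt
  by_cases hx : x ≤ 0
  · rw [if_pos hx]
    have h0 : cifrasLoop x 0 = 0 := cifrasLoop_base x 0 (by omega)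
    simp [h0, PySem.Int.mod]
  · rw [if_neg hx]
    exact main_parity x.toNat x rfl (by omega)
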